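-- pv_equiv track=rewrite | github.com/souryacs/3CExpr | EpiExpr_3D_Prediction_Model/Model_Epigenomic_Contact.py | Define_Channels_per_block
-- ===== SOURCE A (Python) =====
-- def Define_Channels_per_block(Tot_Block):
--     channel_count_list = []
--
--     while Tot_Block > 0:
--         if Tot_Block > 0:
--             if 64 in channel_count_list:
--                 channel_count_list.insert(channel_count_list.index(64), 32)
--             else:
--                 channel_count_list.append(32)
--             Tot_Block = Tot_Block - 1
--         if Tot_Block > 0:
--             if 128 in channel_count_list:
--                 channel_count_list.insert(channel_count_list.index(128), 64)
--             else:
--                 channel_count_list.append(64)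
--             Tot_Block = Tot_Block - 1
--         if Tot_Block > 0:
--             if 256 in channel_count_list:
--                 channel_count_list.insert(channel_count_list.index(256), 128)
--             else:
--                 channel_count_list.append(128)
--             Tot_Block = Tot_Block - 1
--         if Tot_Block > 0:
--             channel_count_list.append(256)
--             Tot_Block = Tot_Block - 1
--
--     return channel_count_list
-- ===== SOURCE B (Python) =====
-- def Define_Channels_per_block(Tot_Block):
--     n = max(Tot_Block, 0)
--     q, r = divmod(n, 4)
--     out = []
--     for i, v in enumerate((32, 64, 128, 256)):
--         out += [v] * (q + (1 if i < r else 0))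
--     return out
-- ===== Notes on version B (the rewrite author's own statement) =====
-- stated objective: faster
-- what changed: Replaces A's while loop with repeated membership tests, list.index scans and mid-list insertions by a direct arithmetic construction: q, r = divmod(n, 4) gives each channel's count and the list is built as four replicated runs.
import Mathlib
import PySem

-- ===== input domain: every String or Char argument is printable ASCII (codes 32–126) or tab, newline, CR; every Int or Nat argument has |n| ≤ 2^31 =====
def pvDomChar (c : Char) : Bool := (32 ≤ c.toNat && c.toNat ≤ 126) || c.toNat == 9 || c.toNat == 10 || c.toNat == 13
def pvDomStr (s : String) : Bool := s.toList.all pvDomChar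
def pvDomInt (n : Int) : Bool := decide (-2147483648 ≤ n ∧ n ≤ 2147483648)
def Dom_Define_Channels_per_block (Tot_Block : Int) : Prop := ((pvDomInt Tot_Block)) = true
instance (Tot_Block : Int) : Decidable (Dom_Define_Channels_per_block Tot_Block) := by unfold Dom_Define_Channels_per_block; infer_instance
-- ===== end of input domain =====

-- B builds the list directly from q, r = divmod(n, 4) instead of A's quadratic insert-scan loop.

-- ===== PORT A =====
-- termination helpers for the while loop (cited by name in decreasing_by)
lemma pv_dec_step (t x : Int) {c : Prop} [Decidable c] (h : x ≤ t) : (if c then x - 1 else x) ≤ t := by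
  split_ifs <;> omega

lemma pv_dec_final (tb x : Int) (h0 : 0 < tb) (h : x ≤ tb - 1) : x.toNat < tb.toNat := by
  omega

-- the while loop of A: state is (Tot_Block, channel_count_list); each iteration runs the
-- four guarded blocks in order (each: membership test, insert-before-index or append, decrement)
def aLoop (tb : Int) (lst : List Int) : List Int :=
  if h : 0 < tb then
    let l1 := if (64:Int) ∈ lst then
                PySem.List.insert lst (((PySem.List.index? lst 64).getD 0 : Nat) : Int) 32
              else lst ++ [32]
    let t1 := tb - 1
    let l2 := if 0 < t1 then
                (if (128:Int) ∈ l1 then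
                   PySem.List.insert l1 (((PySem.List.index? l1 128).getD 0 : Nat) : Int) 64
                 else l1 ++ [64])
              else l1
    let t2 := if 0 < t1 then t1 - 1 else t1
    let l3 := if 0 < t2 then
                (if (256:Int) ∈ l2 then
                   PySem.List.insert l2 (((PySem.List.index? l2 256).getD 0 : Nat) : Int) 128
                 else l2 ++ [128])
              else l2
    let t3 := if 0 < t2 then t2 - 1 else t2
    let l4 := if 0 < t3 then l3 ++ [256] else l3
    let t4 := if 0 < t3 then t3 - 1 else t3
    aLoop t4 l4
  else lst
termination_by tb.toNat
decreasing_by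
  exact pv_dec_final tb _ h (pv_dec_step _ _ (pv_dec_step _ _ (pv_dec_step _ _ (le_refl (tb - 1)))))

def Define_Channels_per_block (Tot_Block : Int) : List Int :=
  aLoop Tot_Block []

-- ===== PORT B =====
def Define_Channels_per_block_alt (Tot_Block : Int) : List Int :=
  let n := max Tot_Block 0
  let q := PySem.Int.floordiv n 4
  let r := PySem.Int.mod n 4
  (PySem.List.enumerate [(32:Int), 64, 128, 256]).foldl
    (fun out iv => out ++ List.replicate (q + (if iv.1 < r then 1 else 0)).toNat iv.2) []

-- ===== PRECONDITION & SPEC =====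
def Spec_Define_Channels_per_block (Tot_Block : Int) (out : List Int) : Prop := out = Define_Channels_per_block_alt Tot_Block
instance (Tot_Block : Int) (out : List Int) : Decidable (Spec_Define_Channels_per_block Tot_Block out) := by unfold Spec_Define_Channels_per_block; infer_instance

-- ===== CLAIM (what is proved, stated in full; the proofs are below) =====
def Claim_equal_Define_Channels_per_block : Prop := ∀ (Tot_Block : Int), Dom_Define_Channels_per_block Tot_Block → Spec_Define_Channels_per_block Tot_Block (Define_Channels_per_block Tot_Block)

-- ===== LEMMAS AND PROOFS =====

-- canonical list after placing 4*q+r blocks (r < 4)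
def L (q r : Nat) : List Int :=
  List.replicate (q + if 0 < r then 1 else 0) 32 ++
  List.replicate (q + if 1 < r then 1 else 0) 64 ++
  List.replicate (q + if 2 < r then 1 else 0) 128 ++
  List.replicate q 256

def altList (n : Nat) : List Int := L (n / 4) (n % 4)

lemma rep_pull (a : Nat) (x : Int) (t : List Int) :
    List.replicate a x ++ x :: t = x :: (List.replicate a x ++ t) := by
  induction a with
  | zero => rfl
  | succ n ih => simp [List.replicate_succ, ih]

lemma step_insert (p : List Int) (v w : Int) (t : List Int) (h : v ∉ p) :
    PySem.List.insert (p ++ v :: t) (((PySem.List.index? (p ++ v :: t) v).getD 0 : Nat) : Int) w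
      = p ++ w :: v :: t := by
  have hidx : PySem.List.index? (p ++ v :: t) v = some p.length :=
    (PySem.List.index?_eq_some_iff _ _ _).mpr ⟨p, t, rfl, rfl, h⟩
  rw [hidx]
  simp only [Option.getD_some]
  rw [PySem.List.insert_natCast _ _ _ (by simp)]
  simp

lemma step64_L (q : Nat) :
    (if (64:Int) ∈ L q 0 then
       PySem.List.insert (L q 0) (((PySem.List.index? (L q 0) 64).getD 0 : Nat) : Int) 32
     else L q 0 ++ [32]) = L q 1 := by
  cases q with
  | zero => decide
  | succ k =>
    have hmem : (64:Int) ∈ L (k+1) 0 := by simp [L]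
    rw [if_pos hmem]
    have hshape : L (k+1) 0
        = List.replicate (k+1) 32 ++ (64 :: (List.replicate k 64 ++
            List.replicate (k+1) 128 ++ List.replicate (k+1) 256)) := by
      simp [L, List.replicate_succ]
    rw [hshape, step_insert _ _ _ _ (by simp)]
    simp [L, rep_pull, List.replicate_succ, List.append_assoc]

lemma step128_L (q : Nat) :
    (if (128:Int) ∈ L q 1 then
       PySem.List.insert (L q 1) (((PySem.List.index? (L q 1) 128).getD 0 : Nat) : Int) 64
     else L q 1 ++ [64]) = L q 2 := by
  cases q with
  | zero => decide
  | succ k =>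
    have hmem : (128:Int) ∈ L (k+1) 1 := by simp [L]
    rw [if_pos hmem]
    have hshape : L (k+1) 1
        = (List.replicate (k+2) 32 ++ List.replicate (k+1) 64) ++ (128 :: (List.replicate k 128 ++
            List.replicate (k+1) 256)) := by
      simp [L, List.replicate_succ]
    rw [hshape, step_insert _ _ _ _ (by simp)]
    simp [L, rep_pull, List.replicate_succ, List.append_assoc]

lemma step256_L (q : Nat) :
    (if (256:Int) ∈ L q 2 then
       PySem.List.insert (L q 2) (((PySem.List.index? (L q 2) 256).getD 0 : Nat) : Int) 128
     else L q 2 ++ [128]) = L q 3 := by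
  cases q with
  | zero => decide
  | succ k =>
    have hmem : (256:Int) ∈ L (k+1) 2 := by simp [L]
    rw [if_pos hmem]
    have hshape : L (k+1) 2
        = (List.replicate (k+2) 32 ++ List.replicate (k+2) 64 ++ List.replicate (k+1) 128)
            ++ (256 :: List.replicate k 256) := by
      simp [L, List.replicate_succ]
    rw [hshape, step_insert _ _ _ _ (by simp)]
    simp [L, rep_pull, List.replicate_succ, List.append_assoc]

lemma app256_L (q : Nat) : L q 3 ++ [256] = L (q+1) 0 := by
  simp [L, ← List.replicate_succ']

lemma altList_eq (q r : Nat) (hr : r < 4) : altList (4 * q + r) = L q r := by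
  unfold altList
  congr 1 <;> omega

lemma loop_main : ∀ (t q : Nat), aLoop (t : Int) (L q 0) = altList (4 * q + t) := by
  intro t
  induction t using Nat.strong_induction_on with
  | _ t ih =>
    intro q
    match t with
    | 0 =>
      rw [aLoop.eq_def]
      norm_num
      simpa using (altList_eq q 0 (by omega)).symm
    | 1 =>
      rw [aLoop.eq_def]
      simp only [dif_pos (show (0:Int) < ((1:Nat):Int) by norm_num)]
      rw [step64_L]
      simp only [if_neg (show ¬((0:Int) < ((1:Nat):Int) - 1) by norm_num)]
      rw [aLoop.eq_def]
      simp only [dif_neg (show ¬((0:Int) < ((1:Nat):Int) - 1) by norm_num)]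
      exact (altList_eq q 1 (by omega)).symm
    | 2 =>
      rw [aLoop.eq_def]
      simp only [dif_pos (show (0:Int) < ((2:Nat):Int) by norm_num)]
      rw [step64_L]
      simp only [if_pos (show (0:Int) < ((2:Nat):Int) - 1 by norm_num)]
      rw [step128_L]
      simp only [if_neg (show ¬((0:Int) < ((2:Nat):Int) - 1 - 1) by norm_num)]
      rw [aLoop.eq_def]
      simp only [dif_neg (show ¬((0:Int) < ((2:Nat):Int) - 1 - 1) by norm_num)]
      exact (altList_eq q 2 (by omega)).symm
    | 3 =>
      rw [aLoop.eq_def]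
      simp only [dif_pos (show (0:Int) < ((3:Nat):Int) by norm_num)]
      rw [step64_L]
      simp only [if_pos (show (0:Int) < ((3:Nat):Int) - 1 by norm_num)]
      rw [step128_L]
      simp only [if_pos (show (0:Int) < ((3:Nat):Int) - 1 - 1 by norm_num)]
      rw [step256_L]
      simp only [if_neg (show ¬((0:Int) < ((3:Nat):Int) - 1 - 1 - 1) by norm_num)]
      rw [aLoop.eq_def]
      simp only [dif_neg (show ¬((0:Int) < ((3:Nat):Int) - 1 - 1 - 1) by norm_num)]
      exact (altList_eq q 3 (by omega)).symm
    | (m+4) =>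
      rw [aLoop.eq_def]
      simp only [dif_pos (show (0:Int) < ((m+4:Nat):Int) from by push_cast; omega)]
      rw [step64_L]
      simp only [if_pos (show (0:Int) < ((m+4:Nat):Int) - 1 from by push_cast; omega)]
      rw [step128_L]
      simp only [if_pos (show (0:Int) < ((m+4:Nat):Int) - 1 - 1 from by push_cast; omega)]
      rw [step256_L]
      simp only [if_pos (show (0:Int) < ((m+4:Nat):Int) - 1 - 1 - 1 from by push_cast; omega)]
      rw [app256_L]
      have hc : ((m+4:Nat):Int) - 1 - 1 - 1 - 1 = ((m:Nat):Int) := by push_cast; omega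
      rw [hc, ih m (by omega) (q+1)]
      congr 1
      omega

lemma alt_eq (Tot_Block : Int) : Define_Channels_per_block_alt Tot_Block = altList Tot_Block.toNat := by
  unfold Define_Channels_per_block_alt altList L
  simp only [PySem.List.enumerate, List.foldl, PySem.Int.floordiv, PySem.Int.mod]
  have h1 : (max Tot_Block 0).fdiv 4 = ((Tot_Block.toNat / 4 : Nat) : Int) := by
    rw [Int.fdiv_eq_ediv]; omega
  have h2 : (max Tot_Block 0).fmod 4 = ((Tot_Block.toNat % 4 : Nat) : Int) := by
    rw [Int.fmod_eq_emod]; omega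
  simp only [h1, h2, List.nil_append]
  have e1 : ((((Tot_Block.toNat / 4 : Nat) : Int)) + if ((0:Int), (32:Int)).1 < ((Tot_Block.toNat % 4 : Nat) : Int) then 1 else 0).toNat
      = Tot_Block.toNat / 4 + if 0 < Tot_Block.toNat % 4 then 1 else 0 := by
    split_ifs <;> simp_all <;> omega
  have e2 : ((((Tot_Block.toNat / 4 : Nat) : Int)) + if ((0:Int)+1, (64:Int)).1 < ((Tot_Block.toNat % 4 : Nat) : Int) then 1 else 0).toNat
      = Tot_Block.toNat / 4 + if 1 < Tot_Block.toNat % 4 then 1 else 0 := by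
    split_ifs <;> simp_all <;> omega
  have e3 : ((((Tot_Block.toNat / 4 : Nat) : Int)) + if ((0:Int)+1+1, (128:Int)).1 < ((Tot_Block.toNat % 4 : Nat) : Int) then 1 else 0).toNat
      = Tot_Block.toNat / 4 + if 2 < Tot_Block.toNat % 4 then 1 else 0 := by
    split_ifs <;> simp_all <;> omega
  have e4 : ((((Tot_Block.toNat / 4 : Nat) : Int)) + if ((0:Int)+1+1+1, (256:Int)).1 < ((Tot_Block.toNat % 4 : Nat) : Int) then 1 else 0).toNat
      = Tot_Block.toNat / 4 := by
    split_ifs <;> simp_all <;> omega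
  simp only [e1, e2, e3, e4]

theorem Define_Channels_per_block_spec : Claim_equal_Define_Channels_per_block := by
  intro Tot_Block _
  unfold Spec_Define_Channels_per_block Define_Channels_per_block
  rw [alt_eq]
  by_cases h : 0 < Tot_Block
  case neg =>
    rw [aLoop.eq_def, dif_neg (by omega)]
    have h0 : Tot_Block.toNat = 0 := by omega
    rw [h0]; decide
  case pos =>
    have h1 : aLoop ((Tot_Block.toNat : Nat) : Int) (L 0 0) = altList (4 * 0 + Tot_Block.toNat) :=
      loop_main _ 0
    have h2 : ((Tot_Block.toNat : Nat) : Int) = Tot_Block := by omega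
    have h3 : L 0 0 = [] := by decide
    rw [h2, h3] at h1
    rw [h1]
    norm_num
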